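-- pv_equiv track=rewrite | github.com/motchell1/bar-app | functions/importNeighborhoodBars/import_neighborhood_bars.py | dedupe_places_by_google_id
-- ===== SOURCE A (Python) =====
-- def dedupe_places_by_google_id(places):
--     deduped = {}
--
--     for place in places:
--         place_id = place.get('google_place_id')
--         if not place_id:
--             continue
--
--         existing = deduped.get(place_id)
--         if existing and existing.get('source') == 'bar':
--             continue
--
--         deduped[place_id] = place
--
--     return list(deduped.values())
-- ===== SOURCE B (Python) =====
-- def dedupe_places_by_google_id(places):
--     groups = {}
--     for place in places:
--         place_id = place.get('google_place_id')
--         if not place_id: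
--             continue
--         groups.setdefault(place_id, []).append(place)
--
--     result = []
--     for group in groups.values():
--         bar = next((p for p in group if p.get('source') == 'bar'), None)
--         result.append(bar if bar is not None else group[-1])
--     return result
-- ===== Notes on version B (the rewrite author's own statement) =====
-- stated objective: alternative
-- what changed: B replaces A's streaming dict with a 'lock on first bar' overwrite rule by two explicit passes: group all places by truthy google_place_id in first-seen order, then per group pick the first 'bar'-source place if any, else the last place.
import Mathlib
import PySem

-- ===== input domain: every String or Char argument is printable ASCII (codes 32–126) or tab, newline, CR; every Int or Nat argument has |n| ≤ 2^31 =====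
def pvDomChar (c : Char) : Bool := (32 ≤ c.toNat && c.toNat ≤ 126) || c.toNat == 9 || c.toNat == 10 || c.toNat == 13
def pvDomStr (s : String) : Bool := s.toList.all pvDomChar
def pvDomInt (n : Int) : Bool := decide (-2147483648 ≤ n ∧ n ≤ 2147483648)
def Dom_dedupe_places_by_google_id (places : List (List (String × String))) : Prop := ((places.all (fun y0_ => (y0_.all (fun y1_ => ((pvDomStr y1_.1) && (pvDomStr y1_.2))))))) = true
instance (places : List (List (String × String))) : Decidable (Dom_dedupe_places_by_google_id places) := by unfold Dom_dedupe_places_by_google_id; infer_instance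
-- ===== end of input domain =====

-- B re-implements A's streaming dedupe as two explicit passes (group by id, then select per group); same cost, proved equal.

-- ===== PORT A =====
-- place.get(k): Python dict lookup returning None when the key is absent
def pvGet (p : List (String × String)) (k : String) : Option String :=
  (PySem.Dict.mk p).get? k

-- the body of A's loop: skip falsy ids, keep an existing 'bar' entry, else overwrite
def pvStepA (d : PySem.Dict String (List (String × String))) (place : List (String × String)) :
    PySem.Dict String (List (String × String)) :=
  match pvGet place "google_place_id" with
  | none => d
  | some place_id =>
    if place_id = "" then d
    else
      match d.get? place_id with
      | some existing =>
        if existing ≠ [] ∧ pvGet existing "source" = some "bar" then d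
        else d.insert place_id place
      | none => d.insert place_id place

def dedupe_places_by_google_id (places : List (List (String × String))) : List (List (String × String)) :=
  (places.foldl pvStepA PySem.Dict.empty).values

-- ===== PORT B =====
def pvIsBar (p : List (String × String)) : Bool :=
  pvGet p "source" == some "bar"

-- B's grouping loop body: groups.setdefault(place_id, []).append(place), skipping falsy ids
def pvStepB (d : PySem.Dict String (List (List (String × String)))) (place : List (String × String)) :
    PySem.Dict String (List (List (String × String))) :=
  match pvGet place "google_place_id" with
  | none => d
  | some place_id =>
    if place_id = "" then d
    else d.modify place_id [] (· ++ [place])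

-- B's selection: first 'bar'-source member of the group if any, else group[-1]
def pvSelect (group : List (List (String × String))) : List (String × String) :=
  match group.find? pvIsBar with
  | some bar => bar
  | none => PySem.List.pyGetD group (-1) []

def dedupe_places_by_google_id_alt (places : List (List (String × String))) : List (List (String × String)) :=
  ((places.foldl pvStepB PySem.Dict.empty).values).map pvSelect

-- ===== PRECONDITION & SPEC =====
def Spec_dedupe_places_by_google_id (places : List (List (String × String))) (out : List (List (String × String))) : Prop := out = dedupe_places_by_google_id_alt places
instance (places : List (List (String × String))) (out : List (List (String × String))) : Decidable (Spec_dedupe_places_by_google_id places out) := by unfold Spec_dedupe_places_by_google_id; infer_instance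

-- ===== CLAIM (what is proved, stated in full; the proofs are below) =====
def Claim_equal_dedupe_places_by_google_id : Prop := ∀ (places : List (List (String × String))), Dom_dedupe_places_by_google_id places → Spec_dedupe_places_by_google_id places (dedupe_places_by_google_id places)

-- ===== LEMMAS AND PROOFS =====

def pvF (q : String × List (List (String × String))) : String × List (String × String) :=
  (q.1, pvSelect q.2)

theorem pvIsBar_ne_nil {b : List (String × String)} (h : pvIsBar b = true) : b ≠ [] := by
  intro hb; subst hb
  simp [pvIsBar, pvGet, PySem.Dict.get?] at h

theorem pvSelect_singleton (p : List (String × String)) : pvSelect [p] = p := by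
  have hlast := PySem.List.pyGetD_neg_one_append_singleton ([] : List (List (String × String))) p []
  simp at hlast
  cases hb : pvIsBar p <;> simp [pvSelect, hb, hlast]

theorem pvSelect_append_of_find {g : List (List (String × String))} {b : List (String × String)}
    (p : List (String × String)) (h : g.find? pvIsBar = some b) : pvSelect (g ++ [p]) = b := by
  simp [pvSelect, List.find?_append, h]

theorem pvSelect_append_of_none {g : List (List (String × String))}
    (p : List (String × String)) (h : g.find? pvIsBar = none) : pvSelect (g ++ [p]) = p := by
  cases hb : pvIsBar p <;>
    simp [pvSelect, List.find?_append, h, hb,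
      PySem.List.pyGetD_neg_one_append_singleton]

theorem pvInv (places : List (List (String × String))) :
    (places.foldl pvStepA PySem.Dict.empty).items
        = ((places.foldl pvStepB PySem.Dict.empty).items).map pvF
    ∧ (places.foldl pvStepB PySem.Dict.empty).keys.Nodup
    ∧ ∀ q ∈ (places.foldl pvStepB PySem.Dict.empty).items, q.2 ≠ [] := by
  induction places using List.reverseRecOn with
  | nil =>
    refine ⟨rfl, ?_, ?_⟩ <;> simp [PySem.Dict.empty, PySem.Dict.keys]
  | append_singleton xs p ih =>
    obtain ⟨ih1, ih2, ih3⟩ := ih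
    simp only [List.foldl_append, List.foldl_cons, List.foldl_nil]
    set dA := xs.foldl pvStepA PySem.Dict.empty with hdA
    set dB := xs.foldl pvStepB PySem.Dict.empty with hdB
    have hkeys : dA.keys = dB.keys := by
      simp only [PySem.Dict.keys, ih1, List.map_map]
      rfl
    have hAnodup : dA.keys.Nodup := hkeys ▸ ih2
    have hcont : ∀ k, dA.contains k = dB.contains k := by
      intro k
      rw [PySem.Dict.contains_eq_decide_mem_keys, PySem.Dict.contains_eq_decide_mem_keys, hkeys]
    cases hg : pvGet p "google_place_id" with
    | none => simp only [pvStepA, pvStepB, hg]; exact ⟨ih1, ih2, ih3⟩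
    | some pid =>
      by_cases hpid : pid = ""
      · simp only [pvStepA, pvStepB, hg, if_pos hpid]; exact ⟨ih1, ih2, ih3⟩
      · simp only [pvStepA, pvStepB, hg, if_neg hpid]
        rw [show dB.modify pid [] (· ++ [p]) = dB.insert pid (dB.getD pid [] ++ [p]) from rfl]
        by_cases hc : dB.contains pid = true
        · -- the id already has a group
          obtain ⟨g, hg2⟩ : ∃ g, dB.get? pid = some g := by
            have h := PySem.Dict.contains_eq_isSome_get? dB pid
            rw [hc] at h
            exact Option.isSome_iff_exists.mp h.symm
          have hgmem : (pid, g) ∈ dB.items :=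
            (PySem.Dict.get?_eq_some_iff_mem_items dB pid g ih2).1 hg2
          have hgne : g ≠ [] := ih3 (pid, g) hgmem
          have hgetD : dB.getD pid [] = g := PySem.Dict.getD_of_get?_eq_some dB [] hg2
          have hAget : dA.get? pid = some (pvSelect g) := by
            apply PySem.Dict.get?_of_mem_items dA _ hAnodup
            rw [ih1]
            exact List.mem_map.mpr ⟨(pid, g), hgmem, rfl⟩
          have hAcont : dA.contains pid = true := (hcont pid).trans hc
          have hval : ∀ q ∈ dB.items, q.1 = pid → q.2 = g := by
            intro q hq hq1
            have h1 : dB.get? q.1 = some q.2 := by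
              have : (q.1, q.2) ∈ dB.items := by simpa using hq
              exact PySem.Dict.get?_of_mem_items dB this ih2
            rw [hq1, hg2] at h1
            exact (Option.some.injEq _ _ ▸ h1).symm
          rw [hgetD]
          cases hfind : g.find? pvIsBar with
          | some b =>
            have hbbar : pvIsBar b = true := List.find?_some hfind
            have hsel : pvSelect g = b := by simp [pvSelect, hfind]
            have hbar : pvGet b "source" = some "bar" := by
              simpa [pvIsBar] using hbbar
            have hcondA : pvSelect g ≠ [] ∧ pvGet (pvSelect g) "source" = some "bar" := by
              rw [hsel]; exact ⟨pvIsBar_ne_nil hbbar, hbar⟩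
            rw [hAget]
            simp only [if_pos hcondA]
            refine ⟨?_, ?_, ?_⟩
            · rw [PySem.Dict.items_insert_of_contains dB _ hc, ih1, List.map_map]
              apply List.map_congr_left
              intro q hq
              by_cases hq1 : q.1 = pid
              · have hq2 : q.2 = g := hval q hq hq1
                simp only [Function.comp_apply, hq1, BEq.rfl, if_true]
                simp only [pvF, hq1, hq2, hsel, pvSelect_append_of_find p hfind]
              · simp [hq1]
            · rw [PySem.Dict.keys_insert_of_contains dB _ hc]; exact ih2
            · intro q hq
              rw [PySem.Dict.items_insert_of_contains dB _ hc] at hq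
              obtain ⟨r, hr, hrq⟩ := List.mem_map.mp hq
              by_cases hr1 : (r.1 == pid) = true
              · rw [if_pos hr1] at hrq; rw [← hrq]; simp
              · rw [if_neg hr1] at hrq; rw [← hrq]; exact ih3 r hr
          | none =>
            have hselmem : pvSelect g ∈ g := by
              have hlast := PySem.List.pyGetD_neg_one g ([] : List (String × String)) hgne
              simp only [pvSelect, hfind]
              rw [hlast]
              exact List.getLast_mem hgne
            have hnotbar : ¬ (pvSelect g ≠ [] ∧ pvGet (pvSelect g) "source" = some "bar") := by
              rintro ⟨-, hb⟩
              have := List.find?_eq_none.mp hfind _ hselmem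
              simp [pvIsBar, hb] at this
            rw [hAget]
            simp only [if_neg hnotbar]
            refine ⟨?_, ?_, ?_⟩
            · rw [PySem.Dict.items_insert_of_contains dA p hAcont,
                PySem.Dict.items_insert_of_contains dB _ hc, ih1, List.map_map, List.map_map]
              apply List.map_congr_left
              intro q hq
              by_cases hq1 : q.1 = pid
              · have hq2 : q.2 = g := hval q hq hq1
                simp [pvF, hq1, hq2, pvSelect_append_of_none p hfind]
              · simp [pvF, hq1]
            · rw [PySem.Dict.keys_insert_of_contains dB _ hc]; exact ih2
            · intro q hq
              rw [PySem.Dict.items_insert_of_contains dB _ hc] at hq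
              obtain ⟨r, hr, hrq⟩ := List.mem_map.mp hq
              by_cases hr1 : (r.1 == pid) = true
              · rw [if_pos hr1] at hrq; rw [← hrq]; simp
              · rw [if_neg hr1] at hrq; rw [← hrq]; exact ih3 r hr
        · -- new id: both sides append
          have hc' : dB.contains pid = false := by simpa using hc
          have hAc : dA.contains pid = false := (hcont pid).trans hc'
          have hA : dA.get? pid = none := (PySem.Dict.get?_eq_none_iff_contains dA pid).2 hAc
          have hgetD : dB.getD pid [] = [] := PySem.Dict.getD_of_not_contains dB [] hc'
          rw [hA, hgetD]
          refine ⟨?_, ?_, ?_⟩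
          · rw [PySem.Dict.items_insert_of_not_contains dA p hAc,
              PySem.Dict.items_insert_of_not_contains dB _ hc', List.map_append, ih1]
            simp [pvF, pvSelect_singleton]
          · rw [PySem.Dict.keys_insert_of_not_contains dB _ hc']
            have hnm : pid ∉ dB.keys := fun hm =>
              absurd ((PySem.Dict.contains_iff_mem_keys dB pid).mpr hm) (by simp [hc'])
            simp only [List.nodup_append, List.nodup_singleton, true_and]
            refine ⟨ih2, fun a ha b hb => ?_⟩
            simp only [List.mem_singleton] at hb
            subst hb
            exact fun hae => hnm (hae ▸ ha)
          · intro q hq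
            rw [PySem.Dict.items_insert_of_not_contains dB _ hc'] at hq
            rcases List.mem_append.mp hq with h | h
            · exact ih3 q h
            · simp only [List.mem_singleton] at h; subst h; simp

-- ===== VERDICT (by name: the statement is the Claim_ definition above) =====
theorem dedupe_places_by_google_id_spec : Claim_equal_dedupe_places_by_google_id := by
  intro places _
  show dedupe_places_by_google_id places = dedupe_places_by_google_id_alt places
  obtain ⟨h1, -, -⟩ := pvInv places
  unfold dedupe_places_by_google_id dedupe_places_by_google_id_alt
  simp only [PySem.Dict.values, h1, List.map_map]
  rfl
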